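-- pv_equiv track=rewrite | github.com/eddableheath/ReFactoredBS | Boson_Dist_Simple.py | bucket_enumerator_generator
-- ===== SOURCE A (Python) =====
-- import copy
--
-- def bucket_enumerator_generator(photon_number, mode_number, previous_set=None, counter=0):
--     """
--     Recursive function that enumerates all output of a repeated combinatorics set.
--     :param photon_number: Number of to be put in a bucket (int)
--     :param mode_number: Number of buckets (int)
--     :param previous_set: previous set (for recursion) (list of lists)
--     :param counter: counter (for recursion) (int)
--     :return: list of lists of possible outputs
--     """
--     if counter == photon_number:
--         return previous_set
--     else:
--         if counter == 0:
--             new_set = [[i] for i in range(mode_number)]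
--         else:
--             new_set = []
--             for i in range(mode_number):
--                 for j in previous_set:
--                     c = copy.copy(j)
--                     if all(number >= i for number in j):
--                         c.append(i)
--                         new_set.append(c)
--         return bucket_enumerator_generator(photon_number, mode_number, new_set, counter+1)
-- ===== SOURCE B (Python) =====
-- import itertools
--
-- def bucket_enumerator_generator(photon_number, mode_number, previous_set=None, counter=0):
--     """
--     Enumerate the possible photon buckets directly: every remaining suffix is a
--     combination with replacement of the modes, appended in reverse (non-increasing)
--     to each bucket it is compatible with.
--     :param photon_number: Number of photons to be put in a bucket (int)
--     :param mode_number: Number of buckets (int)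
--     :param previous_set: partially built buckets to extend (list of lists)
--     :param counter: number of photons already placed in each bucket (int)
--     :return: list of lists of possible outputs
--     """
--     if counter == photon_number:
--         return previous_set
--     base = [[]] if counter == 0 else previous_set
--     remaining = photon_number - counter
--     out = []
--     for rev in itertools.combinations_with_replacement(range(mode_number), remaining):
--         top = rev[-1]
--         for j in base:
--             if all(x >= top for x in j):
--                 out.append(j + list(reversed(rev)))
--     return out
-- ===== Notes on version B (the rewrite author's own statement) =====
-- stated objective: alternative
-- what changed: B enumerates the remaining photons directly as combinations-with-replacement suffixes appended in reverse to each compatible bucket, instead of A's recursive level-by-level frontier; Pre_ restricts counter to the recursion's natural domain 0..photon_number (negative counters and counter>photon_number are recursion-internal misuse: A there either raises, recurses forever, or returns a frontier restart) and excludes previous_set=None mid-recursion, where A raises TypeError.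
-- outside the precondition, e.g. on bucket_enumerator_generator(2, 2, [[-1]], -1): A returns [[0, 0], [1, 0], [1, 1]], B returns []
import Mathlib
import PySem

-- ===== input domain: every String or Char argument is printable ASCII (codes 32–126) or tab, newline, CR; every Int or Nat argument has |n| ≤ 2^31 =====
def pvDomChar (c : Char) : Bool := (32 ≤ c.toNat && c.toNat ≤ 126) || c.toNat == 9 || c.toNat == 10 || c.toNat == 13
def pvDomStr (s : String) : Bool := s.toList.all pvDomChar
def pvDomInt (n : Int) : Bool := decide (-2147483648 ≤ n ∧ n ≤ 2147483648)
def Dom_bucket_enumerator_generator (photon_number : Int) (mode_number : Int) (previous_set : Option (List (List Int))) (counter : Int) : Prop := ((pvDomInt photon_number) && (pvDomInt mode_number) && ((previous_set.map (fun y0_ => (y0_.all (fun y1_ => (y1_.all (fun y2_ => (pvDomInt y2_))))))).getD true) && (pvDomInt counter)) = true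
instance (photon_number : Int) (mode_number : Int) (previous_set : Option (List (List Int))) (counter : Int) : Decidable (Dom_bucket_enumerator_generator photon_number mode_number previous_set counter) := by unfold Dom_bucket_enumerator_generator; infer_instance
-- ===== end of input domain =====

-- B enumerates the remaining photons directly as combinations-with-replacement suffixes
-- instead of A's recursive level-by-level frontier; equivalence is proved on Pre_, which
-- restricts counter to the recursion's natural domain and excludes the None previous_set
-- mid-recursion on which A raises TypeError.

-- ===== PORT A =====
-- inner double loop of A's else-branch: for i in range(mode_number): for j in previous_set: …
def begaStep (mode_number : Int) (prev : List (List Int)) : List (List Int) :=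
  (PySem.List.pyRange 0 mode_number 1).foldl (fun new_set i =>
    prev.foldl (fun acc j =>
      if j.all (fun number => number ≥ i) then acc ++ [j ++ [i]] else acc) new_set) []

def bucket_enumerator_generator (photon_number : Int) (mode_number : Int) (previous_set : Option (List (List Int))) (counter : Int) : Option (List (List Int)) :=
  if counter = photon_number then previous_set
  else if counter < photon_number then
    let new_set :=
      if counter = 0 then (PySem.List.pyRange 0 mode_number 1).map (fun i => [i])
      else begaStep mode_number (previous_set.getD [])  -- previous_set = none here raises TypeError in Python when range(mode_number) is nonempty (excluded by Pre_)
    bucket_enumerator_generator photon_number mode_number (some new_set) (counter + 1)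
  else none  -- counter > photon_number: the Python recursion never terminates (excluded by Pre_)
termination_by (photon_number - counter).toNat
decreasing_by omega

-- ===== PORT B =====
-- hand-rolled port of itertools.combinations_with_replacement(range(mode_number), k),
-- generalised to a lower bound lo for the recursion: non-decreasing k-tuples over
-- [lo, mode_number), in the lexicographic order itertools emits.
def begaCwr (mode_number : Int) (lo : Int) (k : Nat) : List (List Int) :=
  match k with
  | 0 => [[]]
  | Nat.succ k' =>
      (PySem.List.pyRange lo mode_number 1).foldl
        (fun acc x => acc ++ (begaCwr mode_number x k').map (fun r => x :: r)) []

def bucket_enumerator_generator_alt (photon_number : Int) (mode_number : Int) (previous_set : Option (List (List Int))) (counter : Int) : Option (List (List Int)) :=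
  if counter = photon_number then previous_set
  else if photon_number - counter < 0 then none  -- combinations_with_replacement raises ValueError for a negative count (excluded by Pre_)
  else
    let base : Option (List (List Int)) := if counter = 0 then some [[]] else previous_set
    match base with
    | none =>
        -- base = None: Python raises TypeError iterating it, unless the outer loop is
        -- empty (mode_number ≤ 0 with a positive count), in which case it returns []
        if mode_number ≤ 0 then some [] else none
    | some S =>
        some ((begaCwr mode_number 0 (photon_number - counter).toNat).foldl (fun out rev =>
          out ++ (S.foldl (fun acc j =>
            if j.all (fun x => x ≥ rev.getLastD 0) then acc ++ [j ++ rev.reverse] else acc) [])) [])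

-- ===== PRECONDITION & SPEC =====
-- Pre_ restricts counter to the recursion's natural domain 0 ≤ counter ≤ photon_number
-- (negative counters and counter > photon_number are recursion-internal misuse of the
-- accumulator parameters: A there raises, recurses forever, or restarts the frontier) and
-- excludes previous_set = None mid-recursion, where A raises TypeError; inputs with
-- mode_number ≤ 0, where A always terminates with [], stay inside Pre_.
def Pre_bucket_enumerator_generator (photon_number : Int) (mode_number : Int) (previous_set : Option (List (List Int))) (counter : Int) : Prop :=
  counter ≤ photon_number ∧
    (counter = photon_number ∨ mode_number ≤ 0 ∨
      (0 ≤ counter ∧ (counter = 0 ∨ previous_set ≠ none)))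
instance (photon_number : Int) (mode_number : Int) (previous_set : Option (List (List Int))) (counter : Int) : Decidable (Pre_bucket_enumerator_generator photon_number mode_number previous_set counter) := by unfold Pre_bucket_enumerator_generator; infer_instance

def pvWitness_bucket_enumerator_generator : Int × Int × Option (List (List Int)) × Int := (2, 2, none, 0)

def Spec_bucket_enumerator_generator (photon_number : Int) (mode_number : Int) (previous_set : Option (List (List Int))) (counter : Int) (out : Option (List (List Int))) : Prop := out = bucket_enumerator_generator_alt photon_number mode_number previous_set counter
instance (photon_number : Int) (mode_number : Int) (previous_set : Option (List (List Int))) (counter : Int) (out : Option (List (List Int))) : Decidable (Spec_bucket_enumerator_generator photon_number mode_number previous_set counter out) := by unfold Spec_bucket_enumerator_generator; infer_instance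

-- ===== CLAIM =====
def Claim_equal_bucket_enumerator_generator : Prop := ∀ (photon_number : Int) (mode_number : Int) (previous_set : Option (List (List Int))) (counter : Int), Dom_bucket_enumerator_generator photon_number mode_number previous_set counter → Pre_bucket_enumerator_generator photon_number mode_number previous_set counter → Spec_bucket_enumerator_generator photon_number mode_number previous_set counter (bucket_enumerator_generator photon_number mode_number previous_set counter)

-- ===== LEMMAS AND PROOFS =====

-- B's closed enumeration, in flatMap form (proof-side view of B's body)
def begaForm (m : Int) (k : Nat) (S : List (List Int)) : List (List Int) :=
  (begaCwr m 0 k).flatMap (fun rev =>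
    (S.filter (fun j => j.all (fun x => x ≥ rev.getLastD 0))).map (fun j => j ++ rev.reverse))

-- iterating A's step, left to right, as A's recursion does
def begaIter (m : Int) : Nat → List (List Int) → List (List Int)
  | 0, S => S
  | Nat.succ k, S => begaIter m k (begaStep m S)

-- A's step in flatMap/filter/map form
theorem begaStep_eq (m : Int) (S : List (List Int)) :
    begaStep m S = (PySem.List.pyRange 0 m 1).flatMap (fun i =>
      (S.filter (fun j => j.all (fun x => x ≥ i))).map (fun j => j ++ [i])) := by
  simp only [begaStep, PySem.List.foldl_append_if, PySem.List.foldl_append_eq_flatMap,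
    List.nil_append]

-- A's first level is its step applied to the empty bucket
theorem begaStep_nil_elem (m : Int) :
    begaStep m [[]] = (PySem.List.pyRange 0 m 1).map (fun i => [i]) := by
  rw [begaStep_eq]
  simp only [List.filter_cons_of_pos, List.filter_nil, List.all_nil, List.map_cons,
    List.map_nil, List.nil_append]
  exact List.map_eq_flatMap.symm

-- every tuple emitted by begaCwr has length k and entries ≥ lo
theorem begaCwr_mem (m lo : Int) (k : Nat) :
    ∀ rev ∈ begaCwr m lo k, rev.length = k ∧ rev.all (fun x => x ≥ lo) = true := by
  induction k generalizing lo with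
  | zero => intro rev h; simp [begaCwr] at h; simp [h]
  | succ k ih =>
    intro rev h
    rw [begaCwr, PySem.List.foldl_append_eq_flatMap, List.nil_append] at h
    simp only [List.mem_flatMap, List.mem_map] at h
    obtain ⟨x, hx, r, hr, rfl⟩ := h
    have hxlo : lo ≤ x ∧ x < m := PySem.List.mem_pyRange_one.mp hx
    obtain ⟨hlen, hall⟩ := ih x r hr
    refine ⟨by simp [hlen], ?_⟩
    simp only [List.all_cons, Bool.and_eq_true, List.all_eq_true, decide_eq_true_eq] at hall ⊢
    exact ⟨by omega, fun y hy => by have := hall y hy; omega⟩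

-- filtering the tuples by "all entries ≥ i" tightens the lower bound (order preserved)
theorem begaCwr_filter (m : Int) (k : Nat) :
    ∀ lo i : Int, lo ≤ i →
      (begaCwr m lo k).filter (fun rev => rev.all (fun x => x ≥ i)) = begaCwr m i k := by
  induction k with
  | zero => intro lo i _; simp [begaCwr]
  | succ k ih =>
    intro lo i hlo
    rw [begaCwr, begaCwr, PySem.List.foldl_append_eq_flatMap,
      PySem.List.foldl_append_eq_flatMap, List.nil_append, List.nil_append]
    by_cases him : i < m
    · rw [PySem.List.pyRange_one_append lo i m hlo (by omega), List.flatMap_append]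
      have h1 : ((PySem.List.pyRange lo i 1).flatMap
          (fun x => (begaCwr m x k).map (fun r => x :: r))).filter
            (fun rev => rev.all (fun y => y ≥ i)) = [] := by
        rw [List.filter_eq_nil_iff]
        intro rev hrev
        simp only [List.mem_flatMap, List.mem_map] at hrev
        obtain ⟨x, hx, r, _, rfl⟩ := hrev
        have hxi : lo ≤ x ∧ x < i := PySem.List.mem_pyRange_one.mp hx
        simp only [List.all_cons, Bool.and_eq_true, decide_eq_true_eq, not_and]
        intro h; omega
      rw [List.filter_append, h1, List.nil_append]
      have h2 : ∀ x ∈ PySem.List.pyRange i m 1,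
          ((begaCwr m x k).map (fun r => x :: r)).filter
            (fun rev => rev.all (fun y => y ≥ i)) = (begaCwr m x k).map (fun r => x :: r) := by
        intro x hx
        have hxi : i ≤ x ∧ x < m := PySem.List.mem_pyRange_one.mp hx
        rw [List.filter_eq_self]
        intro rev hrev
        simp only [List.mem_map] at hrev
        obtain ⟨r, hr, rfl⟩ := hrev
        have hall := (begaCwr_mem m x k r hr).2
        simp only [List.all_cons, Bool.and_eq_true, decide_eq_true_eq,
          List.all_eq_true] at hall ⊢
        exact ⟨by omega, fun y hy => by have := hall y hy; omega⟩
      calc ((PySem.List.pyRange i m 1).flatMap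
              (fun x => (begaCwr m x k).map (fun r => x :: r))).filter
                (fun rev => rev.all (fun y => y ≥ i))
          = (PySem.List.pyRange i m 1).flatMap
              (fun x => ((begaCwr m x k).map (fun r => x :: r)).filter
                (fun rev => rev.all (fun y => y ≥ i))) := by
            simp [List.flatMap, List.filter_flatten, List.map_map, Function.comp_def]
        _ = (PySem.List.pyRange i m 1).flatMap
              (fun x => (begaCwr m x k).map (fun r => x :: r)) := by
            rw [List.flatMap, List.flatMap]
            exact congrArg List.flatten (List.map_congr_left h2)
    · -- i ≥ m : both sides are empty
      have hr2 : PySem.List.pyRange i m 1 = [] := PySem.List.pyRange_one_eq_nil (by omega)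
      rw [hr2, List.flatMap_nil, List.filter_eq_nil_iff]
      intro rev hrev
      simp only [List.mem_flatMap, List.mem_map] at hrev
      obtain ⟨x, hx, r, hr, rfl⟩ := hrev
      have hxi : lo ≤ x ∧ x < m := PySem.List.mem_pyRange_one.mp hx
      have hall := (begaCwr_mem m x k r hr).2
      simp only [List.all_cons, Bool.and_eq_true, decide_eq_true_eq, not_and]
      intro h; omega

theorem begaIter_succ' (m : Int) (k : Nat) (S : List (List Int)) :
    begaIter m (k + 1) S = begaStep m (begaIter m k S) := by
  induction k generalizing S with
  | zero => rfl
  | succ k ih => rw [begaIter, ih (begaStep m S)]; rfl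

-- flatMap congruence on members, and pushing a filter into flatMap
theorem bega_flatMap_congr {α β : Type} {l : List α} {f g : α → List β}
    (h : ∀ x ∈ l, f x = g x) : l.flatMap f = l.flatMap g := by
  rw [List.flatMap, List.flatMap]
  exact congrArg List.flatten (List.map_congr_left h)

theorem bega_filter_flatMap {α β : Type} (p : β → Bool) (g : α → List β) (l : List α) :
    (l.flatMap g).filter p = l.flatMap (fun x => (g x).filter p) := by
  simp [List.flatMap, List.filter_flatten, List.map_map, Function.comp_def]

theorem bega_flatMap_filter {α β : Type} (q : α → Bool) (g : α → List β) (l : List α) :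
    (l.filter q).flatMap g = l.flatMap (fun x => if q x then g x else []) := by
  induction l with
  | nil => rfl
  | cons x t ih => by_cases h : q x <;> simp [h, ih]

theorem begaCwr_one (m lo : Int) :
    begaCwr m lo 1 = (PySem.List.pyRange lo m 1).map (fun x => [x]) := by
  rw [show (1:Nat) = Nat.succ 0 from rfl, begaCwr]
  simp only [begaCwr, List.map_cons, List.map_nil,
    PySem.List.foldl_append_singleton_eq_map, List.nil_append]

-- B's first level is also A's first level
theorem begaForm_one (m : Int) (S : List (List Int)) :
    begaForm m 1 S = begaStep m S := by
  rw [begaForm, begaCwr_one, List.flatMap_map, begaStep_eq]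
  apply bega_flatMap_congr
  intro x _
  simp [List.getLastD]

-- KEY: one more application of A's step extends the closed enumeration by one level
theorem begaStep_form (m : Int) (k : Nat) (hk : 1 ≤ k) (S : List (List Int)) :
    begaStep m (begaForm m k S) = begaForm m (k + 1) S := by
  rw [begaStep_eq]
  conv_rhs => rw [begaForm, begaCwr, PySem.List.foldl_append_eq_flatMap, List.nil_append,
    List.flatMap_assoc]
  apply bega_flatMap_congr
  intro i hi
  have hi0 : (0:Int) ≤ i ∧ i < m := PySem.List.mem_pyRange_one.mp hi
  rw [List.flatMap_map, begaForm, bega_filter_flatMap, List.map_flatMap]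
  have hbody : ∀ rev ∈ begaCwr m 0 k,
      (((S.filter (fun j => j.all (fun x => x ≥ rev.getLastD 0))).map
          (fun j => j ++ rev.reverse)).filter (fun j => j.all (fun x => x ≥ i))).map
        (fun j => j ++ [i])
      = if rev.all (fun x => x ≥ i) then
          ((S.filter (fun j => j.all (fun x => x ≥ rev.getLastD 0))).filter
            (fun j => j.all (fun x => x ≥ i))).map (fun j => (j ++ rev.reverse) ++ [i])
        else [] := by
    intro rev _
    rw [List.filter_map, List.map_map]
    by_cases hq : rev.all (fun x => x ≥ i)
    · rw [if_pos hq]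
      congr 1
      apply List.filter_congr
      intro j _
      simp only [Function.comp_def, List.all_append, List.all_reverse, hq, Bool.and_true]
    · rw [if_neg hq]
      have : (S.filter (fun j => j.all (fun x => x ≥ rev.getLastD 0))).filter
          ((fun j => j.all (fun x => x ≥ i)) ∘ (fun j => j ++ rev.reverse)) = [] := by
        rw [List.filter_eq_nil_iff]
        intro j _
        simp only [Function.comp_def, List.all_append, List.all_reverse, Bool.and_eq_true,
          not_and]
        intro _ h2
        exact hq h2
      rw [this, List.map_nil]
  rw [bega_flatMap_congr hbody, ← bega_flatMap_filter, begaCwr_filter m k 0 i hi0.1]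
  apply bega_flatMap_congr
  intro rev hrev
  obtain ⟨hlen, hall⟩ := begaCwr_mem m i k rev hrev
  obtain ⟨y, ys, rfl⟩ : ∃ y ys, rev = y :: ys := by
    cases rev with
    | nil => simp at hlen; omega
    | cons y ys => exact ⟨y, ys, rfl⟩
  simp only [List.getLastD_cons, List.reverse_cons]
  have hlasti : ys.getLastD y ≥ i := by
    simp only [List.all_eq_true, decide_eq_true_eq] at hall
    exact hall _ List.getLastD_mem_cons
  rw [List.filter_filter]
  have hfc : S.filter (fun a =>
        (a.all (fun x => x ≥ i)) && a.all (fun x => x ≥ ys.getLastD y))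
      = S.filter (fun j => j.all (fun x => x ≥ ys.getLastD y)) := by
    apply List.filter_congr
    intro j _
    by_cases hc : j.all (fun x => x ≥ ys.getLastD y)
    · have hci : j.all (fun x => x ≥ i) = true := by
        simp only [List.all_eq_true, decide_eq_true_eq] at hc ⊢
        intro x hx
        have := hc x hx
        omega
      simp [hci]
    · simp only [Bool.eq_false_iff.mpr hc, Bool.and_false]
  rw [hfc]
  apply List.map_congr_left
  intro j _
  simp [List.append_assoc]

theorem begaIter_eq_form (m : Int) (k : Nat) (hk : 1 ≤ k) (S : List (List Int)) :
    begaIter m k S = begaForm m k S := by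
  induction k with
  | zero => omega
  | succ k ih =>
    by_cases hk1 : 1 ≤ k
    · rw [begaIter_succ', ih hk1, begaStep_form m k hk1 S]
    · have hk0 : k = 0 := by omega
      subst hk0
      show begaStep m S = begaForm m 1 S
      rw [begaForm_one]

-- A's recursion from a positive counter is begaIter
theorem bega_run (p m : Int) (k : Nat) :
    ∀ (c : Int) (S : List (List Int)), c + k = p → 1 ≤ c →
      bucket_enumerator_generator p m (some S) c = some (begaIter m k S) := by
  induction k with
  | zero =>
    intro c S hc _
    rw [bucket_enumerator_generator]
    simp only [Nat.cast_zero, add_zero] at hc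
    simp [hc, begaIter]
  | succ k ih =>
    intro c S hc hside
    have hclt : c < p := by push_cast at hc; omega
    have hc0 : c ≠ 0 := by push_cast at hc; omega
    rw [bucket_enumerator_generator]
    simp only [if_neg (show ¬ c = p by omega), if_pos hclt, if_neg hc0, Option.getD_some]
    rw [ih (c + 1) (begaStep m S) (by push_cast at hc ⊢; omega) (by omega)]
    rfl

-- A's step over an empty mode range is empty
theorem begaStep_m0 (m : Int) (hm : m ≤ 0) (S : List (List Int)) : begaStep m S = [] := by
  rw [begaStep, PySem.List.pyRange_one_eq_nil (by omega), List.foldl_nil]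

-- with mode_number ≤ 0 every frontier collapses to [] and A terminates with []
theorem bega_m0 (p m : Int) (hm : m ≤ 0) (k : Nat) :
    ∀ (c : Int) (prev : Option (List (List Int))), c + k = p → 1 ≤ k →
      bucket_enumerator_generator p m prev c = some [] := by
  induction k with
  | zero => intro c prev _ h; omega
  | succ k ih =>
    intro c prev hc _
    have hclt : c < p := by push_cast at hc; omega
    rw [bucket_enumerator_generator]
    simp only [if_neg (show ¬ c = p by omega), if_pos hclt]
    have hnew : (if c = 0 then (PySem.List.pyRange 0 m 1).map (fun i => [i])
        else begaStep m (prev.getD [])) = [] := by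
      split_ifs
      · rw [PySem.List.pyRange_one_eq_nil (by omega), List.map_nil]
      · exact begaStep_m0 m hm _
    rw [hnew]
    by_cases hk1 : 1 ≤ k
    · exact ih (c + 1) (some []) (by push_cast at hc ⊢; omega) hk1
    · have : k = 0 := by omega
      subst this
      have hcp : c + 1 = p := by push_cast at hc; omega
      rw [bucket_enumerator_generator]
      simp [hcp]

-- B's fold body is begaForm
theorem bega_alt_body (m : Int) (K : Nat) (S : List (List Int)) :
    ((begaCwr m 0 K).foldl (fun out rev =>
      out ++ (S.foldl (fun acc j =>
        if j.all (fun x => x ≥ rev.getLastD 0) then acc ++ [j ++ rev.reverse] else acc) [])) [])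
    = begaForm m K S := by
  simp only [PySem.List.foldl_append_if, List.nil_append, PySem.List.foldl_append_eq_flatMap,
    begaForm]

-- begaCwr over an empty range of values is empty (positive count)
theorem begaCwr_m0 (m lo : Int) (hm : m ≤ lo) (k : Nat) :
    begaCwr m lo (k + 1) = [] := by
  rw [begaCwr, PySem.List.pyRange_one_eq_nil (by omega), List.foldl_nil]

-- evaluating B's port once its base and count are resolved
theorem bega_alt_eq (p m c : Int) (prev : Option (List (List Int))) (hc : ¬ c = p)
    (hk : ¬ p - c < 0) (S : List (List Int))
    (hbase : (if c = 0 then some [([] : List Int)] else prev) = some S) :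
    bucket_enumerator_generator_alt p m prev c = some (begaForm m (p - c).toNat S) := by
  rw [bucket_enumerator_generator_alt]
  simp only [if_neg hc, if_neg hk, hbase]
  rw [bega_alt_body]

theorem bega_alt_none (p m c : Int) (prev : Option (List (List Int))) (hc : ¬ c = p)
    (hk : ¬ p - c < 0)
    (hbase : (if c = 0 then some [([] : List Int)] else prev) = none) :
    bucket_enumerator_generator_alt p m prev c = if m ≤ 0 then some [] else none := by
  rw [bucket_enumerator_generator_alt]
  simp only [if_neg hc, if_neg hk, hbase]

-- ===== VERDICT =====
theorem bucket_enumerator_generator_spec : Claim_equal_bucket_enumerator_generator := by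
  intro p m prev c _hdom hpre
  obtain ⟨h1, h2⟩ := hpre
  unfold Spec_bucket_enumerator_generator
  by_cases hc : c = p
  · rw [bucket_enumerator_generator, bucket_enumerator_generator_alt]
    simp [hc]
  · have hlt : c < p := lt_of_le_of_ne h1 hc
    by_cases hm : m ≤ 0
    · -- every frontier collapses; both sides are some []
      rw [bega_m0 p m hm (p - c).toNat c prev (by omega) (by omega)]
      by_cases hc0 : c = 0
      · rw [bega_alt_eq p m c prev hc (by omega) [[]] (by rw [if_pos hc0]), begaForm,
          show (p - c).toNat = ((p - c).toNat - 1) + 1 by omega,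
          begaCwr_m0 m 0 (by omega), List.flatMap_nil]
      · cases prev with
        | none =>
          rw [bega_alt_none p m c none hc (by omega) (by rw [if_neg hc0]), if_pos hm]
        | some S =>
          rw [bega_alt_eq p m c (some S) hc (by omega) S (by rw [if_neg hc0]), begaForm,
            show (p - c).toNat = ((p - c).toNat - 1) + 1 by omega,
            begaCwr_m0 m 0 (by omega), List.flatMap_nil]
    · -- m > 0: counter is in the natural domain and previous_set is present
      have h3 : 0 ≤ c ∧ (c = 0 ∨ prev ≠ none) := by
        rcases h2 with h | h | h
        · exact absurd h hc
        · exact absurd h hm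
        · exact h
      by_cases hc0 : c = 0
      · subst hc0
        rw [bega_alt_eq p m 0 prev hc (by omega) [[]] (by rw [if_pos rfl])]
        rw [bucket_enumerator_generator]
        rw [if_neg hc, if_pos hlt, if_pos rfl, ← begaStep_nil_elem]
        show bucket_enumerator_generator p m (some (begaStep m [[]])) 1
          = some (begaForm m (p - 0).toNat [[]])
        rw [bega_run p m (p - 1).toNat 1 _ (by omega) le_rfl]
        congr 1
        rw [show begaIter m (p - 1).toNat (begaStep m [[]])
              = begaIter m ((p - 1).toNat + 1) [[]] from rfl,
          show (p - 1).toNat + 1 = p.toNat by omega,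
          begaIter_eq_form m p.toNat (by omega) [[]],
          show p.toNat = (p - 0).toNat by omega]
      · obtain ⟨S, rfl⟩ : ∃ S, prev = some S := by
          cases prev with
          | none =>
            rcases h3.2 with h | h
            · exact absurd h hc0
            · exact absurd rfl h
          | some S => exact ⟨S, rfl⟩
        rw [bega_alt_eq p m c (some S) hc (by omega) S (by rw [if_neg hc0])]
        rw [bega_run p m (p - c).toNat c S (by omega) (by omega)]
        congr 1
        exact begaIter_eq_form m (p - c).toNat (by omega) S
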